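-- pv_equiv track=rewrite | github.com/kgw012/TIL | 0911/kakao/problem04.py | solution
-- ===== SOURCE A (Python) =====
-- def calc_point(info, l_info):
--     point = 0
--     l_point = 0
--     for i in range(11):
--         if l_info[i] > info[i]:
--             l_point += (10 - i)
--         elif l_info[i] == 0 and info[i] == 0:
--             continue
--         else:
--             point += (10 - i)
--
--     return l_point - point
--
-- def dfs(val_dict):
--     n = val_dict['n']
--     idx = val_dict['idx']
--     cnt = val_dict['cnt']
--     info = val_dict['info']
--     l_info = val_dict['l_info']
--
--     if cnt >= n or idx >= 11:
--         max_point = val_dict['max_point']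
--         max_l_info = val_dict['max_l_info']
--         point = calc_point(info, l_info)
--         if max_point == point:
--             if len(max_l_info) <= 1:
--                 return
--             for i in range(10, -1, -1):
--                 if l_info[i] < max_l_info[i]:
--                     return
--                 elif l_info[i] > max_l_info[i]:
--                     break
--         if max_point <= point:
--             val_dict['max_point'] = point
--             val_dict['max_l_info'] = l_info.copy()
--
--         return
--
--     for i in range(idx, 10):
--         if info[i] >= (n - cnt):
--             continue
--
--         val_dict['idx'] = i + 1
--
--         val_dict['cnt'] += (info[i] + 1)
--         val_dict['l_info'][i] = info[i] + 1
--         dfs(val_dict)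
--         val_dict['cnt'] -= (info[i] + 1)
--         val_dict['l_info'][i] = 0
--         dfs(val_dict)
--
--     val_dict['idx'] = 11
--     val_dict['cnt'] = n
--     val_dict['l_info'][10] = n - cnt
--     dfs(val_dict)
--     val_dict['idx'] = 10
--     val_dict['cnt'] = cnt
--     val_dict['l_info'][10] = 0
--     return
--
-- def solution(n, info):
--     max_point = 0
--     l_info = [0 for _ in range(11)]
--     max_l_info = [-1]
--
--     val_dict = {
--         'n': n,
--         'info': info,
--         'l_info': l_info,
--         'max_point': max_point,
--         'max_l_info': max_l_info,
--         'cnt': 0,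
--         'idx': 0,
--     }
--     dfs(val_dict)
--
--     return val_dict['max_l_info']
-- ===== SOURCE B (Python) =====
-- def solution(n, info):
--     best_point = 0
--     best = [-1]
--     for mask in range(1 << 10):
--         m = mask
--         cnt = 0
--         shots = [0 for _ in range(11)]
--         ok = True
--         for i in range(10):
--             if m % 2:
--                 if cnt >= n or info[i] >= n - cnt:
--                     ok = False
--                     break
--                 cnt += info[i] + 1
--                 shots[i] = info[i] + 1
--             m //= 2
--         if not ok:
--             continue
--         shots[10] = max(0, n - cnt)
--         point = 0
--         for i in range(11):
--             if shots[i] > info[i]: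
--                 point += 10 - i
--             elif shots[i] != 0 or info[i] != 0:
--                 point -= 10 - i
--         if point > best_point:
--             best_point = point
--             best = shots
--         elif point == best_point and len(best) > 1:
--             for i in range(10, -1, -1):
--                 if shots[i] > best[i]:
--                     best = shots
--                     break
--                 if shots[i] < best[i]:
--                     break
--     return best
-- ===== Notes on version B (the rewrite author's own statement) =====
-- stated objective: simpler
-- what changed: Replaces the mutable-dict recursive DFS (with its leftover-idx re-entry quirk and duplicate evaluations) by a flat iteration over all 1<<10 bitmasks of the ten scoring targets, building each candidate arrow list directly and keeping the best by score gap with the high-index-first tie-break.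
import Mathlib
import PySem

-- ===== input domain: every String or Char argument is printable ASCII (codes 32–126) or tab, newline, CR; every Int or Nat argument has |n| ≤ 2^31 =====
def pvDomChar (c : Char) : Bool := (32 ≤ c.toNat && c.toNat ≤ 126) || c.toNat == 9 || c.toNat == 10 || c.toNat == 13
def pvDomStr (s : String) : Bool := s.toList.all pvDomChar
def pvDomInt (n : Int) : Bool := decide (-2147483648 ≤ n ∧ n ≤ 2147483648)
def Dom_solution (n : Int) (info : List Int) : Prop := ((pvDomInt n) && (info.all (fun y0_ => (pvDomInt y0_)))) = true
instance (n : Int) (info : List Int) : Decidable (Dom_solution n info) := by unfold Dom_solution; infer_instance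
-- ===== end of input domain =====

-- B replaces A's mutable-dict recursive DFS by a flat enumeration of the 1024 bitmasks of the
-- ten scoring targets; same return value on every input admitted by Pre_solution.

-- ===== PORT A =====

-- the mutable dict val_dict of A, as a record threaded through the recursion
structure AState where
  n : Int
  info : List Int
  l : List Int
  maxPoint : Int
  maxL : List Int
  cnt : Int
  idx : Int
  deriving Repr, DecidableEq

-- calc_point: loop over range(11); indices are in range whenever Python runs it (Pre_: len info ≥ 11)
def calcA (info l_info : List Int) : Int :=
  let r := (PySem.List.pyRange 0 11 1).foldl (fun (acc : Int × Int) i =>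
      if PySem.List.pyGetD l_info i 0 > PySem.List.pyGetD info i 0 then (acc.1, acc.2 + (10 - i))
      else if PySem.List.pyGetD l_info i 0 = 0 ∧ PySem.List.pyGetD info i 0 = 0 then acc
      else (acc.1 + (10 - i), acc.2)) ((0 : Int), (0 : Int))
  r.2 - r.1

-- the tie-break loop 'for i in range(10, -1, -1)' of the base case; true = the early 'return' fired
def aScan (l_info maxL : List Int) : List Int → Bool
  | [] => false
  | i :: rest =>
    if PySem.List.pyGetD l_info i 0 < PySem.List.pyGetD maxL i 0 then true
    else if PySem.List.pyGetD l_info i 0 > PySem.List.pyGetD maxL i 0 then false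
    else aScan l_info maxL rest

-- the body of dfs's 'cnt >= n or idx >= 11' branch (break in the scan falls through to the
-- 'max_point <= point' replacement test, which then succeeds on equality)
def aBase (s : AState) : AState :=
  let point := calcA s.info s.l
  if s.maxPoint = point ∧ (s.maxL.length ≤ 1 ∨ aScan s.l s.maxL (PySem.List.pyRange 10 (-1) (-1))) then s
  else if s.maxPoint ≤ point then { s with maxPoint := point, maxL := s.l } else s

-- dfs / its for-loop; fuel is ONLY a totality guard (idx strictly increases towards 11 along
-- every nested call, so depth ≤ 12 and fuel 12 is never exhausted); n and cnt are the Python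
-- locals read once at function entry
mutual
def dfsA : Nat → AState → AState
  | 0, s => s
  | fuel+1, s =>
    if s.cnt ≥ s.n ∨ s.idx ≥ 11 then aBase s
    else
      let s1 := dfsLoopA fuel s.n s.cnt (PySem.List.pyRange s.idx 10 1) s
      let s2 : AState := { s1 with
        idx := 11
        cnt := s.n
        l := PySem.List.pySetD s1.l 10 (s.n - s.cnt) }
      let s3 := dfsA fuel s2
      { s3 with
        idx := 10
        cnt := s.cnt
        l := PySem.List.pySetD s3.l 10 0 }
  termination_by fuel _ => (fuel, 0)
def dfsLoopA : Nat → Int → Int → List Int → AState → AState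
  | _, _, _, [], s => s
  | fuel, n, cnt, i :: rest, s =>
    if PySem.List.pyGetD s.info i 0 ≥ n - cnt then dfsLoopA fuel n cnt rest s
    else
      let s2 : AState := { s with
        idx := i + 1
        cnt := s.cnt + (PySem.List.pyGetD s.info i 0 + 1)
        l := PySem.List.pySetD s.l i (PySem.List.pyGetD s.info i 0 + 1) }
      let s3 := dfsA fuel s2
      let s4 : AState := { s3 with
        cnt := s3.cnt - (PySem.List.pyGetD s3.info i 0 + 1)
        l := PySem.List.pySetD s3.l i 0 }
      let s5 := dfsA fuel s4
      dfsLoopA fuel n cnt rest s5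
  termination_by fuel _ _ is _ => (fuel, is.length + 1)
end

def solution (n : Int) (info : List Int) : List Int :=
  let l_info := (PySem.List.pyRange 0 11 1).map (fun _ => (0 : Int))
  (dfsA 12 ⟨n, info, l_info, 0, [-1], 0, 0⟩).maxL

-- ===== PORT B =====

-- inner loop 'for i in range(10)': reads the bits of m; none = the break (ok = False)
def bBuild (n : Int) (info : List Int) : List Int → Int → Int → List Int → Option (Int × List Int)
  | [], _, cnt, shots => some (cnt, shots)
  | i :: rest, m, cnt, shots =>
    if PySem.Int.mod m 2 ≠ 0 then
      if cnt ≥ n ∨ PySem.List.pyGetD info i 0 ≥ n - cnt then none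
      else bBuild n info rest (PySem.Int.floordiv m 2)
             (cnt + (PySem.List.pyGetD info i 0 + 1))
             (PySem.List.pySetD shots i (PySem.List.pyGetD info i 0 + 1))
    else bBuild n info rest (PySem.Int.floordiv m 2) cnt shots

-- the scoring loop of B (single accumulator)
def bScore (info shots : List Int) : Int :=
  (PySem.List.pyRange 0 11 1).foldl (fun (point : Int) i =>
    if PySem.List.pyGetD shots i 0 > PySem.List.pyGetD info i 0 then point + (10 - i)
    else if PySem.List.pyGetD shots i 0 ≠ 0 ∨ PySem.List.pyGetD info i 0 ≠ 0 then point - (10 - i)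
    else point) 0

-- B's tie-break loop; true = 'best = shots' fired before the break
def bScan (shots best : List Int) : List Int → Bool
  | [] => false
  | i :: rest =>
    if PySem.List.pyGetD shots i 0 > PySem.List.pyGetD best i 0 then true
    else if PySem.List.pyGetD shots i 0 < PySem.List.pyGetD best i 0 then false
    else bScan shots best rest

-- loop body over one mask
def bStep (n : Int) (info : List Int) (acc : Int × List Int) (mask : Int) : Int × List Int :=
  match bBuild n info (PySem.List.pyRange 0 10 1) mask 0 ((PySem.List.pyRange 0 11 1).map (fun _ => (0 : Int))) with
  | none => acc
  | some (cnt, shots0) =>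
    let shots := PySem.List.pySetD shots0 10 (max 0 (n - cnt))
    let point := bScore info shots
    if point > acc.1 then (point, shots)
    else if point = acc.1 ∧ acc.2.length > 1 then
      (if bScan shots acc.2 (PySem.List.pyRange 10 (-1) (-1)) then (acc.1, shots) else acc)
    else acc

def solution_alt (n : Int) (info : List Int) : List Int :=
  -- 1 << 10 = 1024
  ((PySem.List.pyRange 0 1024 1).foldl (bStep n info) ((0 : Int), [(-1 : Int)])).2

-- ===== PRECONDITION & SPEC =====
-- Pre_ excludes exactly the inputs on which Python A raises IndexError: calc_point reads info[10],
-- so A raises on every input with len(info) < 11 and returns on every other input.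
def Pre_solution (n : Int) (info : List Int) : Prop := 11 ≤ info.length
instance (n : Int) (info : List Int) : Decidable (Pre_solution n info) := by unfold Pre_solution; infer_instance

def pvWitness_solution : Int × List Int := (3, [2, 1, 0, 0, 0, 0, 0, 0, 0, 0, 0])

def Spec_solution (n : Int) (info : List Int) (out : List Int) : Prop := out = solution_alt n info
instance (n : Int) (info : List Int) (out : List Int) : Decidable (Spec_solution n info out) := by unfold Spec_solution; infer_instance

-- ===== CLAIM (what is proved, stated in full; the proofs are below) =====
def Claim_equal_solution : Prop := ∀ (n : Int) (info : List Int), Dom_solution n info → Pre_solution n info → Spec_solution n info (solution n info)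

-- ===== LEMMAS AND PROOFS =====

-- proof-side abstractions ---------------------------------------------------

-- strict lexicographic greater-than on Int lists
def lexGt : List Int → List Int → Bool
  | x :: xs, y :: ys => x > y || (x == y && lexGt xs ys)
  | _, _ => false

-- "the candidate vector v replaces the best b" (A's base-case replacement condition, abstracted)
def repl (info : List Int) (b : Int × List Int) (v : List Int) : Bool :=
  calcA info v > b.1 || (calcA info v == b.1 && (decide (1 < b.2.length) && lexGt v.reverse b.2.reverse))

def updP (info : List Int) (b : Int × List Int) (v : List Int) : Int × List Int :=
  if repl info b v then (calcA info v, v) else b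

-- bests reachable by A/B: the initial sentinel or a recorded positive-gap vector
def validB (info : List Int) (b : Int × List Int) : Prop :=
  b = (0, [-1]) ∨ (b.2.length = 11 ∧ b.1 = calcA info b.2 ∧ 0 < b.1)

-- the candidate vectors reachable from frontier (idx, cnt, l): choose or skip each target idx..9,
-- a choice of i being legal exactly under A's guards (cnt < n and info[i] < n - cnt)
def cands (n : Int) (info : List Int) : Nat → Int → List Int → List (List Int)
  | idx, cnt, l =>
    if _h : idx < 10 then
      (if cnt < n ∧ PySem.List.pyGetD info (idx : Int) 0 < n - cnt then
        cands n info (idx + 1) (cnt + (PySem.List.pyGetD info (idx : Int) 0 + 1))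
          (l.set idx (PySem.List.pyGetD info (idx : Int) 0 + 1))
       else []) ++ cands n info (idx + 1) cnt l
    else [l.set 10 (n - cnt)]
  termination_by idx _ _ => 10 - idx

def l0 : List Int := (PySem.List.pyRange 0 11 1).map (fun _ => (0 : Int))

-- small facts ---------------------------------------------------------------

theorem l0_eq : l0 = [0, 0, 0, 0, 0, 0, 0, 0, 0, 0, 0] := by decide

theorem set_self_of_getD (l : List Int) (k : Nat) (h : l.getD k 0 = 0) : l.set k 0 = l := by
  apply List.ext_getElem (by simp)
  intro i h1 h2
  rcases eq_or_ne i k with rfl | hne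
  · have hk : i < l.length := by simpa using h2
    have : l[i] = 0 := by
      have := h
      rwa [List.getD_eq_getElem?_getD, List.getElem?_eq_getElem hk, Option.getD_some] at this
    simp [List.getElem_set, this]
  · simp [List.getElem_set, Ne.symm hne]

-- lexGt is irreflexive, transitive and total-on-equal-length lists
theorem lexGt_irrefl (v : List Int) : lexGt v v = false := by
  induction v with
  | nil => rfl
  | cons x xs ih => simp [lexGt, ih]

theorem lexGt_trans : ∀ (a b c : List Int), lexGt a b = true → lexGt b c = true → lexGt a c = true := by
  intro a
  induction a with
  | nil => intro b c h; simp [lexGt] at h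
  | cons x xs ih =>
    intro b c h1 h2
    cases b with
    | nil => simp [lexGt] at h1
    | cons y ys =>
      cases c with
      | nil => simp [lexGt] at h2
      | cons z zs =>
        simp [lexGt] at h1 h2 ⊢
        rcases h1 with h1 | ⟨rfl, h1⟩ <;> rcases h2 with h2 | ⟨rfl, h2⟩
        · exact Or.inl (lt_trans h2 h1)
        · exact Or.inl h1
        · exact Or.inl h2
        · exact Or.inr ⟨rfl, ih _ _ h1 h2⟩

theorem lexGt_antisymm : ∀ (a b : List Int), a.length = b.length →
    lexGt a b = false → lexGt b a = false → a = b := by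
  intro a
  induction a with
  | nil => intro b h _ _; cases b <;> simp_all
  | cons x xs ih =>
    intro b h h1 h2
    cases b with
    | nil => simp at h
    | cons y ys =>
      simp [lexGt] at h1 h2
      have hxy : x = y := by omega
      subst hxy
      simp at h
      have := ih ys h (by simpa using h1.2 rfl) (by simpa using h2.2 rfl)
      simp [this]

-- the two tie-break scans agree (A scans (new, old), B scans (old, new) with flipped tests)
theorem aScan_eq_bScan (l w : List Int) (is : List Int) : aScan l w is = bScan w l is := by
  induction is with
  | nil => rfl
  | cons i rest ih => simp [aScan, bScan, ih]

-- the downward index scan is reverse-lexicographic comparison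
-- congruence used inside bScan_eq_lexGt
theorem bScan_congr (v v' w w' : List Int) (is : List Int)
    (hv : ∀ i ∈ is, PySem.List.pyGetD v i 0 = PySem.List.pyGetD v' i 0)
    (hw : ∀ i ∈ is, PySem.List.pyGetD w i 0 = PySem.List.pyGetD w' i 0) :
    bScan v w is = bScan v' w' is := by
  induction is with
  | nil => rfl
  | cons i rest ih =>
    simp only [bScan, hv i (by simp), hw i (by simp)]
    split <;> try rfl
    split <;> try rfl
    exact ih (fun j hj => hv j (by simp [hj])) (fun j hj => hw j (by simp [hj]))

theorem getD_append_last (v' : List Int) (a : Int) : (v' ++ [a]).getD v'.length 0 = a := by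
  simp [List.getD_eq_getElem?_getD, List.getElem?_append_right (le_refl v'.length)]

theorem getD_append_left (v' : List Int) (a : Int) (i : Nat) (h : i < v'.length) :
    (v' ++ [a]).getD i 0 = v'.getD i 0 := by
  simp [List.getD_eq_getElem?_getD, List.getElem?_append_left h]

theorem bScan_eq_lexGt : ∀ (k : Nat) (v w : List Int), v.length = k → w.length = k →
    bScan v w (PySem.List.pyRange ((k : Int) - 1) (-1) (-1)) = lexGt v.reverse w.reverse := by
  intro k
  induction k with
  | zero =>
    intro v w hv hw
    rw [List.length_eq_zero_iff] at hv hw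
    subst hv; subst hw
    rw [PySem.List.pyRange_neg_one_eq_nil (by norm_num)]
    rfl
  | succ k ih =>
    intro v w hv hw
    rcases v.eq_nil_or_concat with rfl | ⟨v', a, rfl⟩
    · simp at hv
    rcases w.eq_nil_or_concat with rfl | ⟨w', b, rfl⟩
    · simp at hw
    simp only [List.concat_eq_append] at hv hw ⊢
    have hv' : v'.length = k := by simpa using hv
    have hw' : w'.length = k := by simpa using hw
    have hrange : PySem.List.pyRange ((k : Int) + 1 - 1) (-1) (-1)
        = (k : Int) :: PySem.List.pyRange ((k : Int) - 1) (-1) (-1) := by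
      have : ((k : Int) + 1 - 1) = (k : Int) := by ring
      rw [this, PySem.List.pyRange_neg_one_cons (by omega)]
    have hga : PySem.List.pyGetD (v' ++ [a]) ((k : Int)) 0 = a := by
      rw [PySem.List.pyGetD_natCast, ← hv', getD_append_last]
    have hgb : PySem.List.pyGetD (w' ++ [b]) ((k : Int)) 0 = b := by
      rw [PySem.List.pyGetD_natCast, ← hw', getD_append_last]
    have hcongr : bScan (v' ++ [a]) (w' ++ [b]) (PySem.List.pyRange ((k : Int) - 1) (-1) (-1))
        = bScan v' w' (PySem.List.pyRange ((k : Int) - 1) (-1) (-1)) := by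
      apply bScan_congr
      · intro i hi
        rw [PySem.List.mem_pyRange_neg_one] at hi
        rw [PySem.List.pyGetD_of_nonneg _ _ (by omega), PySem.List.pyGetD_of_nonneg _ _ (by omega)]
        exact getD_append_left v' a i.toNat (by omega)
      · intro i hi
        rw [PySem.List.mem_pyRange_neg_one] at hi
        rw [PySem.List.pyGetD_of_nonneg _ _ (by omega), PySem.List.pyGetD_of_nonneg _ _ (by omega)]
        exact getD_append_left w' b i.toNat (by omega)
    rw [show ((k + 1 : Nat) : Int) - 1 = (k : Int) + 1 - 1 by push_cast; ring, hrange]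
    simp only [bScan, hga, hgb, List.reverse_append, List.reverse_cons, List.reverse_nil,
      List.nil_append, List.cons_append, lexGt, hcongr, ih v' w' hv' hw']
    by_cases h1 : a > b
    · simp [h1, (by omega : ¬ a < b)]
    · by_cases h2 : a < b
      · simp [h1, h2, (by omega : ¬ (b < a))]
        exact fun h => absurd h (by omega)
      · have : a = b := by omega
        simp [h1, h2, this, lt_irrefl]

-- A's base case is the abstract update
theorem aBase_eq_updP (s : AState) (hb : validB s.info (s.maxPoint, s.maxL)) (hl : s.l.length = 11) :
    aBase s = { s with maxPoint := (updP s.info (s.maxPoint, s.maxL) s.l).1,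
                       maxL := (updP s.info (s.maxPoint, s.maxL) s.l).2 } := by
  obtain ⟨sn, sinfo, sl, smp, sml, scnt, sidx⟩ := s
  simp only at hb hl
  simp only [aBase, updP, repl]
  rcases hb with hsent | ⟨hlen, heq, hpos⟩
  · obtain ⟨h1, h2⟩ : smp = 0 ∧ sml = [-1] := by
      simpa [Prod.ext_iff] using hsent
    subst h1; subst h2
    by_cases hp : (0 : Int) = calcA sinfo sl
    · simp [← hp]
    · simp only [hp, false_and, if_false, List.length_cons, List.length_nil]
      by_cases hp2 : (0 : Int) ≤ calcA sinfo sl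
      · simp [hp2, (by omega : calcA sinfo sl > 0)]
      · have h1 : decide (calcA sinfo sl > 0) = false := by simp; omega
        simp [h1, hp2]
  · simp only at hlen heq hpos
    have hscan : aScan sl sml (PySem.List.pyRange 10 (-1) (-1)) = lexGt sml.reverse sl.reverse := by
      rw [aScan_eq_bScan]
      have := bScan_eq_lexGt 11 sml sl hlen hl
      norm_num at this
      exact this
    by_cases hp : smp = calcA sinfo sl
    · by_cases hsc : lexGt sml.reverse sl.reverse = true
      · have hnot : lexGt sl.reverse sml.reverse = false := by
          by_contra hcon
          simp only [Bool.not_eq_false] at hcon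
          have := lexGt_trans _ _ _ hsc hcon
          rw [lexGt_irrefl] at this; exact absurd this (by simp)
        simp [hscan, hsc, hp, hnot]
      · have hsc' : lexGt sml.reverse sl.reverse = false := by simpa using hsc
        by_cases hsc2 : lexGt sl.reverse sml.reverse = true
        · simp [hscan, hsc', hsc2, hp, hlen, (by omega : ¬ (11:Nat) ≤ 1)]
        · have hsc2' : lexGt sl.reverse sml.reverse = false := by simpa using hsc2
          have hrev : sl.reverse = sml.reverse :=
            lexGt_antisymm _ _ (by simp [hl, hlen]) hsc2' hsc'
          have hels : sl = sml := by
            have := congrArg List.reverse hrev; simpa using this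
          simp [hscan, hsc', hsc2', hp, hlen, hels, (by omega : ¬ (11:Nat) ≤ 1)]
    · simp only [hp, false_and, if_false]
      by_cases hp2 : smp ≤ calcA sinfo sl
      · simp [hp2, (by omega : calcA sinfo sl > smp)]
      · have h1 : decide (calcA sinfo sl > smp) = false := by simp; omega
        have h2 : (calcA sinfo sl == smp) = false := by simp; omega
        simp [h1, h2, hp2]

theorem repl_pos (info : List Int) (b : Int × List Int) (v : List Int)
    (hb : validB info b) (h : repl info b v = true) :
    0 < calcA info v ∧ (b.1 ≤ calcA info v) := by
  unfold repl at h
  simp only [Bool.or_eq_true, Bool.and_eq_true, decide_eq_true_eq, beq_iff_eq] at h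
  rcases hb with rfl | ⟨h1, h2, h3⟩
  · rcases h with h | ⟨h, h', _⟩
    · exact ⟨h, le_of_lt h⟩
    · simp at h'
  · rcases h with h | ⟨h, _, _⟩ <;> omega

theorem valid_updP (info : List Int) (b : Int × List Int) (v : List Int)
    (hb : validB info b) (hv : v.length = 11) : validB info (updP info b v) := by
  unfold updP
  by_cases h : repl info b v = true
  · have := repl_pos info b v hb h
    simp only [h, if_true]
    exact Or.inr ⟨hv, rfl, this.1⟩
  · simp only [Bool.not_eq_true] at h
    simp [h, hb]

theorem valid_fold (info : List Int) (b : Int × List Int) (vs : List (List Int))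
    (hb : validB info b) (hv : ∀ v ∈ vs, v.length = 11) :
    validB info (vs.foldl (updP info) b) := by
  induction vs generalizing b with
  | nil => exact hb
  | cons v rest ih =>
    exact ih (updP info b v) (valid_updP info b v hb (hv v (by simp))) (fun u hu => hv u (by simp [hu]))

theorem repl_trans (info : List Int) (b : Int × List Int) (v u : List Int)
    (hb : validB info b) (hv : v.length = 11)
    (h1 : repl info b v = true) (h2 : repl info (calcA info v, v) u = true) :
    repl info b u = true := by
  have hp := repl_pos info b v hb h1
  unfold repl at h1 h2 ⊢
  simp only [Bool.or_eq_true, Bool.and_eq_true, decide_eq_true_eq, beq_iff_eq] at h1 h2 ⊢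
  rcases hb with rfl | ⟨hb1, hb2, hb3⟩
  · left; simp only []
    rcases h2 with h2 | ⟨h2, _, _⟩ <;> omega
  · rcases h1 with h1 | ⟨h1, hlen1, hlex1⟩ <;> rcases h2 with h2 | ⟨h2, hlen2, hlex2⟩
    · left; omega
    · left; omega
    · left; omega
    · right
      refine ⟨by omega, hlen1, lexGt_trans _ _ _ hlex2 hlex1⟩

theorem repl_self (info : List Int) (v : List Int) : repl info (calcA info v, v) v = false := by
  simp [repl, lexGt_irrefl]

-- fold characterization: the fold result is in the pool and dominates it
theorem fold_char (info : List Int) (b : Int × List Int) (vs : List (List Int))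
    (hb : validB info b) (hv : ∀ v ∈ vs, v.length = 11) :
    (vs.foldl (updP info) b = b ∨ ∃ v ∈ vs, vs.foldl (updP info) b = (calcA info v, v) ∧ repl info b v = true)
    ∧ (∀ v ∈ vs, repl info (vs.foldl (updP info) b) v = false) := by
  induction vs generalizing b with
  | nil => exact ⟨Or.inl rfl, by simp⟩
  | cons v rest ih =>
    have hv11 : v.length = 11 := hv v (by simp)
    have hrest : ∀ u ∈ rest, u.length = 11 := fun u hu => hv u (by simp [hu])
    simp only [List.foldl_cons]
    by_cases hrep : repl info b v = true
    · have hb' : validB info (calcA info v, v) := by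
        have := repl_pos info b v hb hrep
        exact Or.inr ⟨hv11, rfl, this.1⟩
      have hbv : updP info b v = (calcA info v, v) := by simp [updP, hrep]
      rw [hbv]
      obtain ⟨ih1, ih2⟩ := ih (calcA info v, v) hb' hrest
      constructor
      · rcases ih1 with h | ⟨u, hu, hr, hru⟩
        · exact Or.inr ⟨v, by simp, h, hrep⟩
        · exact Or.inr ⟨u, by simp [hu], hr, repl_trans info b v u hb hv11 hrep hru⟩
      · intro u hu
        rcases List.mem_cons.mp hu with rfl | hu
        · rcases ih1 with h | ⟨w, hw, hr, hrw⟩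
          · rw [h]; exact repl_self info u
          · rw [hr]
            by_contra hcon
            simp only [Bool.not_eq_false] at hcon
            have := repl_trans info (calcA info u, u) w u hb' (hrest w hw) hrw hcon
            rw [repl_self info u] at this; exact absurd this (by simp)
        · exact ih2 u hu
    · have hrf : repl info b v = false := by simpa using hrep
      have hbv : updP info b v = b := by simp [updP, hrf]
      rw [hbv]
      obtain ⟨ih1, ih2⟩ := ih b hb hrest
      constructor
      · rcases ih1 with h | ⟨u, hu, hr, hru⟩
        · exact Or.inl h
        · exact Or.inr ⟨u, by simp [hu], hr, hru⟩
      · intro u hu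
        rcases List.mem_cons.mp hu with rfl | hu
        · rcases ih1 with h | ⟨w, hw, hr, hrw⟩
          · rw [h]; exact hrf
          · rw [hr]
            by_contra hcon
            simp only [Bool.not_eq_false] at hcon
            have hwv : validB info (calcA info w, w) := by
              have := repl_pos info b w hb hrw
              exact Or.inr ⟨hrest w hw, rfl, this.1⟩
            have := repl_trans info b w u hb (hrest w hw) hrw hcon
            exact absurd this (by simp [hrep])
        · exact ih2 u hu

theorem fold_unique (info : List Int) (b : Int × List Int) (vs ws : List (List Int))
    (hb : validB info b) (hv : ∀ v ∈ vs, v.length = 11) (hw : ∀ v ∈ ws, v.length = 11)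
    (hset : ∀ v, v ∈ vs ↔ v ∈ ws) :
    vs.foldl (updP info) b = ws.foldl (updP info) b := by
  obtain ⟨c1, c2⟩ := fold_char info b vs hb hv
  obtain ⟨d1, d2⟩ := fold_char info b ws hb hw
  rcases c1 with hc | ⟨v1, hv1, hr1, hrep1⟩ <;> rcases d1 with hd | ⟨v2, hv2, hr2, hrep2⟩
  · rw [hc, hd]
  · exfalso
    have : repl info (vs.foldl (updP info) b) v2 = false := c2 v2 ((hset v2).mpr hv2)
    rw [hc] at this; rw [this] at hrep2; exact absurd hrep2 (by simp)
  · exfalso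
    have : repl info (ws.foldl (updP info) b) v1 = false := d2 v1 ((hset v1).mp hv1)
    rw [hd] at this; rw [this] at hrep1; exact absurd hrep1 (by simp)
  · have h11 : v1.length = 11 := hv v1 hv1
    have h21 : v2.length = 11 := hw v2 hv2
    have n12 : repl info (calcA info v1, v1) v2 = false := by
      have := c2 v2 ((hset v2).mpr hv2); rwa [hr1] at this
    have n21 : repl info (calcA info v2, v2) v1 = false := by
      have := d2 v1 ((hset v1).mp hv1); rwa [hr2] at this
    unfold repl at n12 n21
    simp only [Bool.or_eq_false_iff, Bool.and_eq_false_iff, decide_eq_false_iff_not, not_lt,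
      beq_eq_false_iff_ne, ne_eq] at n12 n21
    have hc12 : calcA info v1 = calcA info v2 := by omega
    have hlx1 : lexGt v2.reverse v1.reverse = false := by
      rcases n12.2 with h | h | h
      · exact absurd hc12 (Ne.symm h)
      · exact absurd (by simp [h11] : (1:Nat) < v1.length) (by simpa using h)
      · exact h
    have hlx2 : lexGt v1.reverse v2.reverse = false := by
      rcases n21.2 with h | h | h
      · exact absurd hc12 h
      · exact absurd (by simp [h21] : (1:Nat) < v2.length) (by simpa using h)
      · exact h
    have : v2.reverse = v1.reverse := by
      refine lexGt_antisymm _ _ (by simp [h11, h21]) hlx1 hlx2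
    have hv12 : v1 = v2 := by
      have := congrArg List.reverse this; simpa using this.symm
    rw [hr1, hr2, hv12]

-- candidate list facts
theorem cands_length_aux (n : Int) (info : List Int) : ∀ (d idx : Nat) (cnt : Int) (l : List Int),
    10 - idx ≤ d → l.length = 11 → ∀ v ∈ cands n info idx cnt l, v.length = 11 := by
  intro d
  induction d with
  | zero =>
    intro idx cnt l hd hl v hv
    have : ¬ idx < 10 := by omega
    rw [cands, dif_neg this] at hv
    simp at hv
    simp [hv, hl]
  | succ d ih =>
    intro idx cnt l hd hl v hv
    by_cases h : idx < 10
    · rw [cands, dif_pos h] at hv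
      rcases List.mem_append.mp hv with hv | hv
      · split at hv
        · exact ih (idx + 1) _ _ (by omega) (by simp [hl]) v hv
        · simp at hv
      · exact ih (idx + 1) _ _ (by omega) hl v hv
    · rw [cands, dif_neg h] at hv
      simp at hv
      simp [hv, hl]

theorem cands_length (n : Int) (info : List Int) : ∀ (idx : Nat) (cnt : Int) (l : List Int),
    l.length = 11 → ∀ v ∈ cands n info idx cnt l, v.length = 11 := by
  intro idx cnt l
  exact cands_length_aux n info (10 - idx) idx cnt l (le_refl _)

theorem cands_of_ge_aux (n : Int) (info : List Int) : ∀ (d idx : Nat) (cnt : Int) (l : List Int),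
    10 - idx ≤ d → ¬ cnt < n → cands n info idx cnt l = [l.set 10 (n - cnt)] := by
  intro d
  induction d with
  | zero =>
    intro idx cnt l hd hc
    have : ¬ idx < 10 := by omega
    rw [cands, dif_neg this]
  | succ d ih =>
    intro idx cnt l hd hc
    by_cases h : idx < 10
    · rw [cands, dif_pos h, if_neg (by tauto), List.nil_append]
      exact ih (idx + 1) cnt l (by omega) hc
    · rw [cands, dif_neg h]

theorem cands_of_ge (n : Int) (info : List Int) : ∀ (idx : Nat) (cnt : Int) (l : List Int),
    ¬ cnt < n → cands n info idx cnt l = [l.set 10 (n - cnt)] :=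
  fun idx cnt l => cands_of_ge_aux n info (10 - idx) idx cnt l (le_refl _)

theorem tail_mem_cands_aux (n : Int) (info : List Int) : ∀ (d idx : Nat) (cnt : Int) (l : List Int),
    10 - idx ≤ d → l.set 10 (n - cnt) ∈ cands n info idx cnt l := by
  intro d
  induction d with
  | zero =>
    intro idx cnt l hd
    have : ¬ idx < 10 := by omega
    rw [cands, dif_neg this]; simp
  | succ d ih =>
    intro idx cnt l hd
    by_cases h : idx < 10
    · rw [cands, dif_pos h]
      exact List.mem_append.mpr (Or.inr (ih (idx + 1) cnt l (by omega)))
    · rw [cands, dif_neg h]; simp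

theorem tail_mem_cands (n : Int) (info : List Int) : ∀ (idx : Nat) (cnt : Int) (l : List Int),
    l.set 10 (n - cnt) ∈ cands n info idx cnt l :=
  fun idx cnt l => tail_mem_cands_aux n info (10 - idx) idx cnt l (le_refl _)

-- ===== the main characterization of A's dfs =====

theorem pySetD_ten (l : List Int) (x : Int) : PySem.List.pySetD l 10 x = l.set 10 x := by
  rw [PySem.List.pySetD_of_nonneg _ _ (by norm_num)]
  rfl

theorem pySetD_nat (l : List Int) (k : Nat) (x : Int) : PySem.List.pySetD l (k : Int) x = l.set k x := by
  rw [PySem.List.pySetD_of_nonneg _ _ (by positivity)]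
  simp

theorem dfs_base (fuel : Nat) (s : AState) (hf : 0 < fuel) (h : s.cnt ≥ s.n ∨ s.idx ≥ 11) :
    dfsA fuel s = aBase s := by
  cases fuel with
  | zero => omega
  | succ f =>
    rw [dfsA]
    rw [if_pos h]

def dfsPost (n : Int) (info : List Int) (fuel : Nat) : Prop :=
  ∀ (l : List Int) (mp : Int) (ml : List Int) (cnt : Int) (k : Nat),
    k ≤ 10 → cnt < n → l.length = 11 →
    (∀ kk : Nat, k ≤ kk → kk < 11 → l.getD kk 0 = 0) →
    validB info (mp, ml) → 12 ≤ fuel + k →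
    ∃ L : List (List Int),
      dfsA fuel ⟨n, info, l, mp, ml, cnt, (k : Int)⟩ =
        ⟨n, info, l, (L.foldl (updP info) (mp, ml)).1, (L.foldl (updP info) (mp, ml)).2, cnt, 10⟩
      ∧ (∀ v, v ∈ L ↔ v ∈ cands n info k cnt l)
      ∧ (∀ v ∈ L, v.length = 11)

theorem loop_aux (n : Int) (info : List Int) (fuel : Nat) (hdfs : dfsPost n info fuel) :
    ∀ (d k : Nat), 10 - k ≤ d → k ≤ 10 →
    ∀ (l : List Int) (mp : Int) (ml : List Int) (cnt ix : Int),
      cnt < n → l.length = 11 →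
      (∀ kk : Nat, k ≤ kk → kk < 11 → l.getD kk 0 = 0) →
      validB info (mp, ml) → 11 ≤ fuel + k →
      ∃ (L : List (List Int)) (ix' : Int),
        dfsLoopA fuel n cnt (PySem.List.pyRange (k : Int) 10 1) ⟨n, info, l, mp, ml, cnt, ix⟩ =
          ⟨n, info, l, (L.foldl (updP info) (mp, ml)).1, (L.foldl (updP info) (mp, ml)).2, cnt, ix'⟩
        ∧ (∀ v, v ∈ L ++ [l.set 10 (n - cnt)] ↔ v ∈ cands n info k cnt l)
        ∧ (∀ v ∈ L, v.length = 11) := by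
  intro d
  induction d with
  | zero =>
    intro k hd hk l mp ml cnt ix hcn hl hz hv hfuel
    have hk10 : k = 10 := by omega
    subst hk10
    rw [PySem.List.pyRange_one_eq_nil (by norm_num)]
    refine ⟨[], ix, ?_, ?_, by simp⟩
    · simp [dfsLoopA]
    · intro v
      rw [cands, dif_neg (by omega)]
      simp
  | succ d ih =>
    intro k hd hk l mp ml cnt ix hcn hl hz hv hfuel
    by_cases hklt : k < 10
    swap
    · have hk10 : k = 10 := by omega
      subst hk10
      rw [PySem.List.pyRange_one_eq_nil (by norm_num)]
      refine ⟨[], ix, ?_, ?_, by simp⟩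
      · simp [dfsLoopA]
      · intro v
        rw [cands, dif_neg (by omega)]
        simp
    · rw [PySem.List.pyRange_one_cons (by exact_mod_cast hklt)]
      rw [dfsLoopA]
      simp only []
      set Δ : Int := PySem.List.pyGetD info (k : Int) 0 + 1 with hΔ
      by_cases hskip : PySem.List.pyGetD info (k : Int) 0 ≥ n - cnt
      · rw [if_pos hskip]
        rw [show (k : Int) + 1 = ((k + 1 : Nat) : Int) by push_cast; ring]
        obtain ⟨L, ix', hEq, hMem, hLen⟩ := ih (k + 1) (by omega) (by omega) l mp ml cnt ix hcn hl
          (fun kk h1 h2 => hz kk (by omega) h2) hv (by omega)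
        refine ⟨L, ix', hEq, ?_, hLen⟩
        intro v
        rw [cands, dif_pos hklt, if_neg (by push_neg; intro _; omega), List.nil_append]
        exact hMem v
      · rw [if_neg hskip]
        have hchoose : PySem.List.pyGetD info (k : Int) 0 < n - cnt := by omega
        have hle : cnt + Δ ≤ n := by omega
        have hsetk : PySem.List.pySetD l (k : Int) Δ = l.set k Δ := by
          rw [PySem.List.pySetD_of_nonneg _ _ (by positivity)]
          simp
        have hlset : (l.set k Δ).length = 11 := by simp [hl]
        have hset0 : (l.set k Δ).set k 0 = l := by
          rw [List.set_set]
          exact set_self_of_getD l k (hz k (le_refl _) (by omega))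
        -- first recursive call
        by_cases hfull : cnt + Δ < n
        · -- non-base first call
          obtain ⟨L1, hEq1, hMem1, hLen1⟩ := hdfs (l.set k Δ) mp ml (cnt + Δ) (k + 1)
            (by omega) hfull hlset
            (fun kk h1 h2 => by
              rw [List.getD_eq_getElem?_getD, List.getElem?_set_ne (by omega), ← List.getD_eq_getElem?_getD]
              exact hz kk (by omega) h2)
            hv (by omega)
          rw [show ((k + 1 : Nat) : Int) = (k : Int) + 1 by push_cast; ring] at hEq1
          rw [hsetk, hEq1]
          rw [← hΔ, pySetD_nat, hset0, show cnt + Δ - Δ = cnt by ring]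
          have hval1 : validB info ((L1.foldl (updP info) (mp, ml)).1, (L1.foldl (updP info) (mp, ml)).2) := by
            have := valid_fold info (mp, ml) L1 hv hLen1
            simpa using this
          -- second call: from idx = 10
          obtain ⟨L2, hEq2, hMem2, hLen2⟩ := hdfs l
            (L1.foldl (updP info) (mp, ml)).1 (L1.foldl (updP info) (mp, ml)).2 cnt 10
            (by omega) hcn hl (fun kk h1 h2 => hz kk (by omega) h2) hval1 (by omega)
          rw [show ((10 : Nat) : Int) = (10 : Int) by norm_num] at hEq2
          rw [hEq2]
          simp only [Prod.mk.eta]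
          simp only [← List.foldl_append]
          -- the loop tail
          obtain ⟨L3, ix', hEq3, hMem3, hLen3⟩ := ih (k + 1) (by omega) (by omega) l
            ((L1 ++ L2).foldl (updP info) (mp, ml)).1 ((L1 ++ L2).foldl (updP info) (mp, ml)).2 cnt 10
            hcn hl (fun kk h1 h2 => hz kk (by omega) h2)
            (by
              have := valid_fold info (mp, ml) (L1 ++ L2) hv (by
                intro v hvv
                rcases List.mem_append.mp hvv with h | h
                · exact hLen1 v h
                · exact hLen2 v h)
              simpa using this)
            (by omega)
          rw [show (k : Int) + 1 = ((k + 1 : Nat) : Int) by push_cast; ring]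
          rw [hEq3]
          refine ⟨L1 ++ L2 ++ L3, ix', by
            simp only [Prod.mk.eta, ← List.foldl_append, List.append_assoc], ?_, ?_⟩
          · intro v
            rw [cands, dif_pos hklt, if_pos ⟨hcn, hchoose⟩]
            constructor
            · intro hvin
              simp only [List.append_assoc, List.mem_append] at hvin
              rcases hvin with h1 | h2 | h3
              · exact List.mem_append.mpr (Or.inl ((hMem1 v).mp h1))
              · have := (hMem2 v).mp h2
                rw [cands, dif_neg (by omega : ¬ (10:Nat) < 10)] at this
                simp only [List.mem_singleton] at this
                refine List.mem_append.mpr (Or.inr ?_)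
                rw [this]
                exact tail_mem_cands n info (k + 1) cnt l
              · exact List.mem_append.mpr (Or.inr ((hMem3 v).mp (by simpa using h3)))
            · intro hvin
              simp only [List.append_assoc, List.mem_append]
              rcases List.mem_append.mp hvin with h | h
              · exact Or.inl ((hMem1 v).mpr h)
              · have := (hMem3 v).mpr h
                rcases List.mem_append.mp this with h' | h'
                · exact Or.inr (Or.inr (by simp [h']))
                · exact Or.inr (Or.inr (by simp [List.mem_singleton.mp h']))
          · intro v hvv
            rcases List.mem_append.mp hvv with hvv | hvv
            · rcases List.mem_append.mp hvv with h | h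
              · exact hLen1 v h
              · exact hLen2 v h
            · exact hLen3 v hvv
        · -- first call hits the base case (cnt + Δ = n)
          have hfull' : cnt + Δ = n := by omega
          rw [hsetk]
          rw [dfs_base fuel ⟨n, info, l.set k Δ, mp, ml, cnt + Δ, (k : Int) + 1⟩ (by omega)
            (Or.inl (by show cnt + Δ ≥ n; omega))]
          rw [aBase_eq_updP _ (by simpa using hv) (by simpa using hlset)]
          rw [← hΔ, pySetD_nat, hset0, show cnt + Δ - Δ = cnt by ring]
          set u := updP info (mp, ml) (l.set k Δ) with hu
          have hval1 : validB info u := valid_updP info (mp, ml) (l.set k Δ) hv hlset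
          have huu : (u.1, u.2) = u := by simp
          -- second call: from idx = k + 1
          obtain ⟨L2, hEq2, hMem2, hLen2⟩ := hdfs l u.1 u.2 cnt (k + 1)
            (by omega) hcn hl (fun kk h1 h2 => hz kk (by omega) h2) (by simpa [huu] using hval1) (by omega)
          rw [show ((k + 1 : Nat) : Int) = (k : Int) + 1 by push_cast; ring] at hEq2
          rw [hEq2]
          obtain ⟨L3, ix', hEq3, hMem3, hLen3⟩ := ih (k + 1) (by omega) (by omega) l
            (L2.foldl (updP info) (u.1, u.2)).1 (L2.foldl (updP info) (u.1, u.2)).2 cnt 10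
            hcn hl (fun kk h1 h2 => hz kk (by omega) h2)
            (by
              have := valid_fold info (u.1, u.2) L2 (by simpa [huu] using hval1) hLen2
              simpa using this)
            (by omega)
          rw [show (k : Int) + 1 = ((k + 1 : Nat) : Int) by push_cast; ring]
          rw [hEq3]
          refine ⟨l.set k Δ :: (L2 ++ L3), ix', ?_, ?_, ?_⟩
          · rw [List.foldl_cons, List.foldl_append, ← hu]
          · intro v
            rw [cands, dif_pos hklt, if_pos ⟨hcn, hchoose⟩]
            have hcands1 : cands n info (k + 1) (cnt + Δ) (l.set k Δ) = [l.set k Δ] := by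
              rw [cands_of_ge n info (k + 1) (cnt + Δ) (l.set k Δ) (by omega)]
              congr 1
              rw [hfull']
              simp only [sub_self]
              apply set_self_of_getD
              rw [List.getD_eq_getElem?_getD, List.getElem?_set_ne (by omega), ← List.getD_eq_getElem?_getD]
              exact hz 10 (by omega) (by omega)
            rw [hcands1]
            constructor
            · intro hvin
              rcases List.mem_cons.mp hvin with rfl | hvin
              · exact List.mem_append.mpr (Or.inl (by simp))
              · rcases List.mem_append.mp hvin with hvv | hvv
                · rcases List.mem_append.mp hvv with h | h
                  · exact List.mem_append.mpr (Or.inr ((hMem2 v).mp h))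
                  · exact List.mem_append.mpr (Or.inr ((hMem3 v).mp (List.mem_append.mpr (Or.inl h))))
                · exact List.mem_append.mpr (Or.inr ((hMem3 v).mp (List.mem_append.mpr (Or.inr hvv))))
            · intro hvin
              rcases List.mem_append.mp hvin with h | h
              · exact List.mem_cons.mpr (Or.inl (by simpa using h))
              · have := (hMem3 v).mpr h
                rcases List.mem_append.mp this with h' | h'
                · exact List.mem_cons.mpr (Or.inr (List.mem_append.mpr (Or.inl (List.mem_append.mpr (Or.inr h')))))
                · exact List.mem_cons.mpr (Or.inr (List.mem_append.mpr (Or.inr h')))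
          · intro v hvv
            rcases List.mem_cons.mp hvv with rfl | hvv
            · exact hlset
            · rcases List.mem_append.mp hvv with h | h
              · exact hLen2 v h
              · exact hLen3 v h

theorem dfs_succ (n : Int) (info : List Int) (fuel : Nat) (h : dfsPost n info fuel) :
    dfsPost n info (fuel + 1) := by
  intro l mp ml cnt k hk hcn hl hz hv hfuel
  rw [dfsA]
  rw [if_neg (by simp only []; omega)]
  simp only []
  obtain ⟨L, ix', hEq, hMem, hLen⟩ := loop_aux n info fuel h 10 k (by omega) hk l mp ml cnt (k : Int)
    hcn hl hz hv (by omega)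
  rw [hEq]
  simp only []
  rw [pySetD_ten]
  rw [dfs_base fuel _ (by omega) (by simp only []; omega)]
  rw [aBase_eq_updP _ (by
      have := valid_fold info (mp, ml) L hv hLen
      simpa using this)
    (by simp [hl])]
  simp only []
  rw [pySetD_ten, List.set_set, set_self_of_getD l 10 (hz 10 (by omega) (by omega))]
  refine ⟨L ++ [l.set 10 (n - cnt)], ?_, ?_, ?_⟩
  · rw [List.foldl_append]
    simp
  · exact hMem
  · intro v hvv
    rcases List.mem_append.mp hvv with h' | h'
    · exact hLen v h'
    · simp only [List.mem_singleton] at h'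
      simp [h', hl]

theorem dfs_main (n : Int) (info : List Int) : ∀ fuel, dfsPost n info fuel := by
  intro fuel
  induction fuel with
  | zero => intro l mp ml cnt k hk _ _ _ _ hfuel; omega
  | succ f ihf => exact dfs_succ n info f ihf

-- ===== the characterization of B =====

-- bBuild seen as an optional candidate vector per mask
def bVec (n : Int) (info : List Int) (j : Nat) (cnt : Int) (shots : List Int) (m : Int) : Option (List Int) :=
  (bBuild n info (PySem.List.pyRange (j : Int) 10 1) m cnt shots).map
    (fun p => p.2.set 10 (max 0 (n - p.1)))

theorem bVec_cons (n : Int) (info : List Int) (j : Nat) (cnt : Int) (shots : List Int) (m : Int)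
    (hj : j < 10) :
    bVec n info j cnt shots m =
      (if PySem.Int.mod m 2 ≠ 0 then
        if cnt ≥ n ∨ PySem.List.pyGetD info (j : Int) 0 ≥ n - cnt then none
        else bVec n info (j+1) (cnt + (PySem.List.pyGetD info (j : Int) 0 + 1))
          (PySem.List.pySetD shots (j : Int) (PySem.List.pyGetD info (j : Int) 0 + 1))
          (PySem.Int.floordiv m 2)
      else bVec n info (j+1) cnt shots (PySem.Int.floordiv m 2)) := by
  unfold bVec
  rw [PySem.List.pyRange_one_cons (by exact_mod_cast hj)]
  simp only [bBuild]
  rw [show ((j+1:Nat):Int) = (j:Int) + 1 by push_cast; ring]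
  split
  · split
    · rfl
    · rfl
  · rfl

theorem bBuild_char (n : Int) (info : List Int) : ∀ (d j : Nat) (cnt : Int) (shots : List Int),
    10 - j ≤ d → j ≤ 10 → cnt ≤ n → shots.length = 11 →
    ∀ v, v ∈ cands n info j cnt shots ↔
      ∃ m : Int, 0 ≤ m ∧ m < 2 ^ (10 - j) ∧ bVec n info j cnt shots m = some v := by
  intro d
  induction d with
  | zero =>
    intro j cnt shots hd hj hcn hs v
    have hj10 : j = 10 := by omega
    subst hj10
    rw [cands, dif_neg (by omega)]
    unfold bVec
    rw [PySem.List.pyRange_one_eq_nil (by norm_num)]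
    simp only [bBuild, Option.map_some]
    constructor
    · intro hv
      simp at hv
      exact ⟨0, by norm_num, by norm_num, by
        simp [hv, max_eq_right (by omega : (0:Int) ≤ n - cnt)]⟩
    · rintro ⟨m, _, _, hm⟩
      simp only [Option.some.injEq] at hm
      simp [← hm, max_eq_right (by omega : (0:Int) ≤ n - cnt)]
  | succ d ih =>
    intro j cnt shots hd hj hcn hs v
    by_cases hjlt : j < 10
    swap
    · -- j = 10 : same as base case
      have hj10 : j = 10 := by omega
      subst hj10
      rw [cands, dif_neg (by omega)]
      unfold bVec
      rw [PySem.List.pyRange_one_eq_nil (by norm_num)]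
      simp only [bBuild, Option.map_some]
      constructor
      · intro hv
        simp at hv
        exact ⟨0, by norm_num, by norm_num, by
          simp [hv, max_eq_right (by omega : (0:Int) ≤ n - cnt)]⟩
      · rintro ⟨m, _, _, hm⟩
        simp only [Option.some.injEq] at hm
        simp [← hm, max_eq_right (by omega : (0:Int) ≤ n - cnt)]
    · rw [cands, dif_pos hjlt]
      have hpow : (2:Int) ^ (10 - j) = 2 * 2 ^ (10 - (j+1)) := by
        rw [show 10 - j = (10 - (j+1)) + 1 by omega, pow_succ]
        ring
      have hsetL : PySem.List.pySetD shots (j : Int) (PySem.List.pyGetD info (j : Int) 0 + 1)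
          = shots.set j (PySem.List.pyGetD info (j : Int) 0 + 1) := by
        rw [PySem.List.pySetD_of_nonneg _ _ (by positivity)]
        simp
      constructor
      · intro hv
        rcases List.mem_append.mp hv with hv | hv
        · -- choose branch
          split at hv
          next hfeas =>
            obtain ⟨m', hm0, hmlt, hbv⟩ := (ih (j+1) _ _ (by omega) (by omega) (by omega) (by simp [hs]) v).mp hv
            refine ⟨2 * m' + 1, by omega, by omega, ?_⟩
            rw [bVec_cons n info j cnt shots _ hjlt]
            rw [if_pos (by
              rw [PySem.Int.mod_eq_emod_of_pos (by norm_num)]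
              omega)]
            rw [if_neg (by omega)]
            rw [show PySem.Int.floordiv (2 * m' + 1) 2 = m' by
              rw [PySem.Int.floordiv_eq_ediv_of_pos (by norm_num)]; omega]
            rw [hsetL]
            exact hbv
          next => simp at hv
        · -- skip branch
          obtain ⟨m', hm0, hmlt, hbv⟩ := (ih (j+1) cnt shots (by omega) (by omega) hcn hs v).mp hv
          refine ⟨2 * m', by omega, by omega, ?_⟩
          rw [bVec_cons n info j cnt shots _ hjlt]
          rw [if_neg (by
            rw [PySem.Int.mod_eq_emod_of_pos (by norm_num)]
            omega)]
          rw [show PySem.Int.floordiv (2 * m') 2 = m' by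
            rw [PySem.Int.floordiv_eq_ediv_of_pos (by norm_num)]; omega]
          exact hbv
      · rintro ⟨m, hm0, hmlt, hbv⟩
        rw [bVec_cons n info j cnt shots _ hjlt] at hbv
        rw [PySem.Int.mod_eq_emod_of_pos (by norm_num)] at hbv
        rw [show PySem.Int.floordiv m 2 = m / 2 from PySem.Int.floordiv_eq_ediv_of_pos (by norm_num)] at hbv
        by_cases hodd : m % 2 = 0
        · rw [if_neg (by omega)] at hbv
          have := (ih (j+1) cnt shots (by omega) (by omega) hcn hs v).mpr
            ⟨m / 2, by omega, by omega, hbv⟩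
          exact List.mem_append.mpr (Or.inr this)
        · rw [if_pos (by omega)] at hbv
          by_cases hg : cnt ≥ n ∨ PySem.List.pyGetD info (j : Int) 0 ≥ n - cnt
          · rw [if_pos hg] at hbv; exact absurd hbv (by simp)
          · rw [if_neg hg, hsetL] at hbv
            push_neg at hg
            have := (ih (j+1) _ _ (by omega) (by omega) (by omega) (by simp [hs]) v).mpr
              ⟨m / 2, by omega, by omega, hbv⟩
            refine List.mem_append.mpr (Or.inl ?_)
            rw [if_pos ⟨by omega, by omega⟩]
            exact this

theorem bBuild_length (n : Int) (info : List Int) : ∀ (is : List Int) (m cnt : Int) (shots : List Int) (c : Int) (sh : List Int),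
    bBuild n info is m cnt shots = some (c, sh) → sh.length = shots.length := by
  intro is
  induction is with
  | nil => intro m cnt shots c sh h; simp [bBuild] at h; simp [h.2]
  | cons i rest ih =>
    intro m cnt shots c sh h
    simp only [bBuild] at h
    split at h
    · split at h
      · exact absurd h (by simp)
      · have := ih _ _ _ _ _ h; simpa [PySem.List.length_pySetD] using this
    · exact ih _ _ _ _ _ h

-- B's score is A's calc_point
theorem bScore_aux (info v : List Int) : ∀ (is : List Int) (q : Int) (pr : Int × Int), q = pr.2 - pr.1 →
    is.foldl (fun (point : Int) i =>
      if PySem.List.pyGetD v i 0 > PySem.List.pyGetD info i 0 then point + (10 - i)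
      else if PySem.List.pyGetD v i 0 ≠ 0 ∨ PySem.List.pyGetD info i 0 ≠ 0 then point - (10 - i)
      else point) q =
    (is.foldl (fun (acc : Int × Int) i =>
      if PySem.List.pyGetD v i 0 > PySem.List.pyGetD info i 0 then (acc.1, acc.2 + (10 - i))
      else if PySem.List.pyGetD v i 0 = 0 ∧ PySem.List.pyGetD info i 0 = 0 then acc
      else (acc.1 + (10 - i), acc.2)) pr).2 -
    (is.foldl (fun (acc : Int × Int) i =>
      if PySem.List.pyGetD v i 0 > PySem.List.pyGetD info i 0 then (acc.1, acc.2 + (10 - i))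
      else if PySem.List.pyGetD v i 0 = 0 ∧ PySem.List.pyGetD info i 0 = 0 then acc
      else (acc.1 + (10 - i), acc.2)) pr).1 := by
  intro is
  induction is with
  | nil => intro q pr h; simpa using h
  | cons i rest ih =>
    intro q pr h
    simp only [List.foldl_cons]
    by_cases h1 : PySem.List.pyGetD v i 0 > PySem.List.pyGetD info i 0
    · rw [if_pos h1, if_pos h1]
      exact ih _ _ (by simp [h]; ring)
    · rw [if_neg h1, if_neg h1]
      by_cases h2 : PySem.List.pyGetD v i 0 = 0 ∧ PySem.List.pyGetD info i 0 = 0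
      · rw [if_pos h2, if_neg (by tauto)]
        exact ih _ _ h
      · rw [if_neg h2, if_pos (by tauto)]
        exact ih _ _ (by simp [h]; ring)

theorem bScore_eq_calcA (info v : List Int) : bScore info v = calcA info v := by
  unfold bScore calcA
  exact bScore_aux info v _ 0 (0, 0) (by simp)

-- one step of B's outer loop is the abstract update
theorem bStep_eq_updP (n : Int) (info : List Int) (acc : Int × List Int) (mask : Int)
    (hb : validB info acc) :
    bStep n info acc mask =
      match bVec n info 0 0 l0 mask with
      | none => acc
      | some v => updP info acc v := by
  unfold bStep bVec
  rw [show ((PySem.List.pyRange 0 11 1).map (fun _ => (0:Int))) = l0 from rfl,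
    show PySem.List.pyRange ((0:Nat):Int) 10 1 = PySem.List.pyRange 0 10 1 by norm_num]
  cases hbd : bBuild n info (PySem.List.pyRange 0 10 1) mask 0 l0 with
  | none => simp [hbd]
  | some p =>
    obtain ⟨cnt, shots0⟩ := p
    have hlen0 : shots0.length = 11 := by
      have := bBuild_length n info _ _ _ _ _ _ hbd
      simpa [l0_eq] using this
    have hset : PySem.List.pySetD shots0 10 (max 0 (n - cnt)) = shots0.set 10 (max 0 (n - cnt)) := by
      rw [PySem.List.pySetD_of_nonneg _ _ (by norm_num)]
      rfl
    simp only [hbd, Option.map_some, hset]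
    have hv11 : (shots0.set 10 (max 0 (n - cnt))).length = 11 := by simp [hlen0]
    set v := shots0.set 10 (max 0 (n - cnt)) with hv
    have hscore : bScore info v = calcA info v := bScore_eq_calcA info v
    unfold updP repl
    simp only [hscore]
    rcases hb with hsent | ⟨hlen, heq, hpos⟩
    · obtain ⟨h1, h2⟩ : acc.1 = 0 ∧ acc.2 = [-1] := by
        cases acc; simpa [Prod.ext_iff] using hsent
      by_cases hp : calcA info v > 0
      · simp [hscore, h1, h2, hp]
      · simp only [hscore, h1, h2]
        rw [if_neg (by omega), if_neg (by simp), if_neg (by simp; omega)]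
    · have hbscan : bScan v acc.2 (PySem.List.pyRange 10 (-1) (-1)) = lexGt v.reverse acc.2.reverse := by
        have := bScan_eq_lexGt 11 v acc.2 hv11 hlen
        norm_num at this
        exact this
      by_cases hp : calcA info v > acc.1
      · simp [hp]
      · by_cases hpe : calcA info v = acc.1
        · rw [if_neg (by omega),
            if_pos (show calcA info v = acc.1 ∧ acc.2.length > 1 from ⟨hpe, by omega⟩), hbscan]
          simp [hpe, hlen]
        · rw [if_neg (by omega), if_neg (fun hcon => hpe hcon.1)]
          have hd : decide (calcA info v > acc.1) = false := by simp; omega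
          have he : (calcA info v == acc.1) = false := by simp [hpe]
          simp [hd, he]

-- the fold of bStep is the abstract fold over the per-mask candidates
theorem bFold_eq (n : Int) (info : List Int) (ms : List Int) (acc : Int × List Int)
    (hb : validB info acc) :
    ms.foldl (bStep n info) acc =
      (ms.filterMap (bVec n info 0 0 l0)).foldl (updP info) acc := by
  induction ms generalizing acc with
  | nil => rfl
  | cons m rest ih =>
    simp only [List.foldl_cons, List.filterMap_cons]
    rw [bStep_eq_updP n info acc m hb]
    cases hbv : bVec n info 0 0 l0 m with
    | none => simpa using ih acc hb
    | some v =>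
      have hv11 : v.length = 11 := by
        unfold bVec at hbv
        cases hbd : bBuild n info (PySem.List.pyRange ((0:Nat):Int) 10 1) m 0 l0 with
        | none => rw [hbd] at hbv; simp at hbv
        | some p =>
          rw [hbd] at hbv
          simp only [Option.map_some, Option.some.injEq] at hbv
          have hl := bBuild_length n info _ _ _ _ _ _ hbd
          subst hbv
          simp [l0_eq] at hl
          simp [hl]
      simp only []
      exact ih (updP info acc v) (valid_updP info acc v hb hv11)

-- n ≤ 0: only mask 0 survives bBuild
theorem bBuild_of_nonpos (n : Int) (info : List Int) : ∀ (is : List Int) (m cnt : Int) (shots : List Int),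
    n ≤ cnt → 0 ≤ m →
    bBuild n info is m cnt shots =
      if PySem.Int.mod m (2 ^ is.length) = 0 then some (cnt, shots) else none := by
  intro is
  induction is with
  | nil =>
    intro m cnt shots hn hm
    rw [PySem.Int.mod_eq_emod_of_pos (by norm_num)]
    simp [bBuild]
  | cons i rest ih =>
    intro m cnt shots hn hm
    have hK : (0:Int) < 2 ^ rest.length := by positivity
    have h2K : (2:Int) ^ (i :: rest).length = 2 * 2 ^ rest.length := by
      simp [pow_succ]; ring
    rw [h2K, PySem.Int.mod_eq_emod_of_pos (by positivity)]
    simp only [bBuild]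
    rw [PySem.Int.mod_eq_emod_of_pos (by norm_num), PySem.Int.floordiv_eq_ediv_of_pos (by norm_num)]
    by_cases hodd : m % 2 = 0
    · obtain ⟨t, ht⟩ : ∃ t, m = 2 * t := ⟨m / 2, by omega⟩
      have hmd : m / 2 = t := by omega
      rw [if_neg (by simp [hodd]), hmd, ih t cnt shots hn (by omega)]
      rw [PySem.Int.mod_eq_emod_of_pos hK, ht, Int.mul_emod_mul_of_pos _ _ (by norm_num)]
      have : 2 * (t % 2 ^ rest.length) = 0 ↔ t % 2 ^ rest.length = 0 := by omega
      split_ifs with h1 h2 h3 <;> first | rfl | (exfalso; omega)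
    · rw [if_pos (by simpa using hodd), if_pos (by omega : cnt ≥ n ∨ PySem.List.pyGetD info i 0 ≥ n - cnt)]
      have hd : (2:Int) ∣ 2 * 2 ^ rest.length := ⟨2 ^ rest.length, rfl⟩
      rw [if_neg]
      intro hcon
      have := Int.emod_emod_of_dvd m hd
      rw [hcon] at this
      simp at this
      exact hodd this.symm

theorem l0_len : l0.length = 11 := by decide

theorem l0_getD (kk : Nat) : l0.getD kk 0 = 0 := by
  rw [l0_eq]
  rcases kk with _|_|_|_|_|_|_|_|_|_|_|kk <;> simp [List.getD_eq_getElem?_getD]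

theorem l0_set10 : l0.set 10 0 = l0 := set_self_of_getD l0 10 (l0_getD 10)

-- A's entry state, characterized
theorem solution_eq_fold (n : Int) (info : List Int) (hn : 0 < n) :
    ∃ L : List (List Int),
      solution n info = (L.foldl (updP info) (0, [-1])).2
      ∧ (∀ v, v ∈ L ↔ v ∈ cands n info 0 0 l0)
      ∧ (∀ v ∈ L, v.length = 11) := by
  obtain ⟨L, hEq, hMem, hLen⟩ := dfs_main n info 12 l0 0 [-1] 0 0 (by omega) hn l0_len
    (fun kk _ h2 => l0_getD kk) (Or.inl rfl) (by omega)
  rw [show ((0:Nat):Int) = (0:Int) by norm_num] at hEq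
  refine ⟨L, ?_, hMem, hLen⟩
  unfold solution
  rw [show ((PySem.List.pyRange 0 11 1).map (fun _ => (0:Int))) = l0 from rfl]
  show (dfsA 12 ⟨n, info, l0, 0, [-1], 0, 0⟩).maxL = (L.foldl (updP info) (0, [-1])).2
  rw [hEq]

theorem alt_eq_fold (n : Int) (info : List Int) :
    solution_alt n info =
      (((PySem.List.pyRange 0 1024 1).filterMap (bVec n info 0 0 l0)).foldl (updP info) (0, [-1])).2 := by
  unfold solution_alt
  rw [bFold_eq n info _ _ (Or.inl rfl)]

-- ===== VERDICT =====
theorem solution_spec : Claim_equal_solution := by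
  intro n info _hdom hpre
  unfold Spec_solution
  by_cases hn : 0 < n
  · -- main case: positive arrow budget
    obtain ⟨L, hA, hMem, hLen⟩ := solution_eq_fold n info hn
    rw [hA, alt_eq_fold n info]
    have hchar := bBuild_char n info 10 0 0 l0 (by omega) (by omega) (by omega) l0_len
    have hmemB : ∀ v, v ∈ (PySem.List.pyRange 0 1024 1).filterMap (bVec n info 0 0 l0) ↔
        v ∈ cands n info 0 0 l0 := by
      intro v
      rw [List.mem_filterMap, hchar v]
      constructor
      · rintro ⟨m, hm, hbv⟩
        rw [PySem.List.mem_pyRange_one] at hm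
        exact ⟨m, hm.1, by norm_num; omega, hbv⟩
      · rintro ⟨m, h0, hlt, hbv⟩
        refine ⟨m, ?_, hbv⟩
        rw [PySem.List.mem_pyRange_one]
        norm_num at hlt
        omega
    have := fold_unique info (0, [-1]) L
      ((PySem.List.pyRange 0 1024 1).filterMap (bVec n info 0 0 l0)) (Or.inl rfl) hLen
      (fun v hvv => cands_length n info 0 0 l0 l0_len v ((hmemB v).mp hvv))
      (fun v => (hMem v).trans (hmemB v).symm)
    rw [this]
  · -- n ≤ 0: A evaluates only the all-zero vector, B keeps only mask 0
    have hn0 : n ≤ 0 := by omega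
    unfold solution
    rw [show ((PySem.List.pyRange 0 11 1).map (fun _ => (0:Int))) = l0 from rfl]
    show (dfsA 12 ⟨n, info, l0, 0, [-1], 0, 0⟩).maxL = solution_alt n info
    rw [dfs_base 12 ⟨n, info, l0, 0, [-1], 0, 0⟩ (by omega) (Or.inl (by show (0:Int) ≥ n; omega))]
    rw [aBase_eq_updP _ (Or.inl rfl) (by simpa using l0_len)]
    rw [alt_eq_fold n info]
    have hfm : (PySem.List.pyRange 0 1024 1).filterMap (bVec n info 0 0 l0) = [l0] := by
      have hbv : ∀ m : Int, 0 ≤ m → m < 1024 →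
          bVec n info 0 0 l0 m = if m = 0 then some l0 else none := by
        intro m h0 hlt
        unfold bVec
        rw [bBuild_of_nonpos n info _ m 0 l0 hn0 h0]
        rw [show ((PySem.List.pyRange ((0:Nat):Int) 10 1).length) = 10 by
          rw [PySem.List.length_pyRange_one]; norm_num; rfl]
        rw [PySem.Int.mod_eq_emod_of_pos (by norm_num : (0:Int) < 2 ^ 10)]
        have h1024 : ((2:Int) ^ 10) = 1024 := by norm_num
        rw [h1024, Int.emod_eq_of_lt h0 hlt]
        by_cases hm : m = 0
        · rw [if_pos hm, if_pos hm]
          simp [max_eq_left hn0, l0_set10]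
        · rw [if_neg hm, if_neg hm]
          simp
      rw [PySem.List.pyRange_one_cons (by norm_num)]
      rw [List.filterMap_cons]
      rw [hbv 0 (by norm_num) (by norm_num), if_pos rfl]
      simp only [show (0:Int) + 1 = 1 by norm_num]
      have : (PySem.List.pyRange 1 1024 1).filterMap (bVec n info 0 0 l0) = [] := by
        rw [List.filterMap_eq_nil_iff]
        intro m hm
        rw [PySem.List.mem_pyRange_one] at hm
        rw [hbv m (by omega) (by omega), if_neg (by omega)]
      rw [this]
    rw [hfm]
    simp [List.foldl_cons]
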